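-- pv_equiv track=rewrite | github.com/Lone1ove/shell-code | shell_agent/working_memory.py | _memory_action_history
-- ===== SOURCE A (Python) =====
-- from typing import Dict, List, Optional
--
-- def _memory_action_history(state: Dict) -> List[str]:
--     filtered: List[str] = []
--     for item in list(state.get("action_history") or []):
--         text = str(item).strip()
--         if not text:
--             continue
--         lower = text.lower()
--         if (
--             "forced advisor review" in lower
--             or "advisor_loop_limit" in lower
--             or "converged_without_action" in lower
--             or lower.startswith("[executionoutcome]")
--             or lower.startswith("[strategyswitch]")
--         ):
--             continue
--         filtered.append(text)
--     return filtered[-18:]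
-- ===== SOURCE B (Python) =====
-- def _memory_action_history(state):
--     out = []
--     for item in reversed(list(state.get("action_history") or [])):
--         text = str(item).strip()
--         if not text:
--             continue
--         lower = text.lower()
--         if (
--             "forced advisor review" in lower
--             or "advisor_loop_limit" in lower
--             or "converged_without_action" in lower
--             or lower.startswith("[executionoutcome]")
--             or lower.startswith("[strategyswitch]")
--         ):
--             continue
--         out.append(text)
--         if len(out) == 18:
--             break
--     out.reverse()
--     return out
-- ===== Notes on version B (the rewrite author's own statement) =====
-- stated objective: alternative
-- what changed: B scans the history backwards, collecting surviving stripped entries and stopping as soon as 18 are found, then reverses the buffer, instead of building the full filtered list and slicing [-18:].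
import Mathlib
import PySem

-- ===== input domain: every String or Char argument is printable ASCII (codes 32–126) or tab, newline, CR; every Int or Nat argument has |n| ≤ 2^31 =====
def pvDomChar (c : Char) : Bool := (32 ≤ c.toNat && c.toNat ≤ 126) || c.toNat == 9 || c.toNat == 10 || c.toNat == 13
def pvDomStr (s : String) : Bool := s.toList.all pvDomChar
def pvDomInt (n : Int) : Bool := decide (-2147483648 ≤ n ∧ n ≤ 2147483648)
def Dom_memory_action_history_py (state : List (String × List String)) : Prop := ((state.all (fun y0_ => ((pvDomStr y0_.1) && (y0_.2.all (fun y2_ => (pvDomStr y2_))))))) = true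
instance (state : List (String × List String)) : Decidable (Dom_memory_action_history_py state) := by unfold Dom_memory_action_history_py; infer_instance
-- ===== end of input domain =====

-- B scans the history backwards, collecting surviving stripped entries and stopping once 18
-- are found, then reverses the buffer, instead of filtering everything and slicing [-18:].

-- ===== PORT A =====
def memory_action_history_py (state : List (String × List String)) : List String :=
  let filtered : List String :=
    ((PySem.Dict.mk state).getD "action_history" []).foldl (fun filtered item =>
      let text := PySem.Str.strip item
      if text = "" then filtered
      else
        let lower := PySem.Str.lower text
        if PySem.Str.isIn "forced advisor review" lower
            || PySem.Str.isIn "advisor_loop_limit" lower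
            || PySem.Str.isIn "converged_without_action" lower
            || PySem.Str.startswith lower "[executionoutcome]"
            || PySem.Str.startswith lower "[strategyswitch]" then filtered
        else filtered ++ [text]) []
  PySem.List.slice filtered (some (-18)) none

-- ===== PORT B =====
def altCollect : List String → List String → List String
  | [], out => out
  | item :: rest, out =>
    let text := PySem.Str.strip item
    if text = "" then altCollect rest out
    else
      let lower := PySem.Str.lower text
      if PySem.Str.isIn "forced advisor review" lower
          || PySem.Str.isIn "advisor_loop_limit" lower
          || PySem.Str.isIn "converged_without_action" lower
          || PySem.Str.startswith lower "[executionoutcome]"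
          || PySem.Str.startswith lower "[strategyswitch]" then altCollect rest out
      else
        let out' := out ++ [text]
        if out'.length = 18 then out' else altCollect rest out'

def memory_action_history_py_alt (state : List (String × List String)) : List String :=
  (altCollect ((PySem.Dict.mk state).getD "action_history" []).reverse []).reverse

-- ===== PRECONDITION & SPEC =====
def Spec_memory_action_history_py (state : List (String × List String)) (out : List String) : Prop := out = memory_action_history_py_alt state
instance (state : List (String × List String)) (out : List String) : Decidable (Spec_memory_action_history_py state out) := by unfold Spec_memory_action_history_py; infer_instance

-- ===== CLAIM (what is proved, stated in full; the proofs are below) =====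
def Claim_equal_memory_action_history_py : Prop := ∀ (state : List (String × List String)), Dom_memory_action_history_py state → Spec_memory_action_history_py state (memory_action_history_py state)

-- ===== LEMMAS AND PROOFS =====


/-- The shared survivor function: `some` of the stripped text if the entry is kept. -/
def pvKeep? (item : String) : Option String :=
  let text := PySem.Str.strip item
  if text = "" then none
  else
    let lower := PySem.Str.lower text
    if PySem.Str.isIn "forced advisor review" lower
        || PySem.Str.isIn "advisor_loop_limit" lower
        || PySem.Str.isIn "converged_without_action" lower
        || PySem.Str.startswith lower "[executionoutcome]"
        || PySem.Str.startswith lower "[strategyswitch]" then none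
    else some text

theorem bodyA_eq (acc : List String) (item : String) :
    (let text := PySem.Str.strip item
     if text = "" then acc
     else
       let lower := PySem.Str.lower text
       if PySem.Str.isIn "forced advisor review" lower
           || PySem.Str.isIn "advisor_loop_limit" lower
           || PySem.Str.isIn "converged_without_action" lower
           || PySem.Str.startswith lower "[executionoutcome]"
           || PySem.Str.startswith lower "[strategyswitch]" then acc
       else acc ++ [text])
    = (match pvKeep? item with
       | none => acc
       | some t => acc ++ [t]) := by
  simp only [pvKeep?]
  split_ifs <;> rfl

theorem foldlA_eq_filterMap (l acc : List String) :
    l.foldl (fun filtered item =>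
      let text := PySem.Str.strip item
      if text = "" then filtered
      else
        let lower := PySem.Str.lower text
        if PySem.Str.isIn "forced advisor review" lower
            || PySem.Str.isIn "advisor_loop_limit" lower
            || PySem.Str.isIn "converged_without_action" lower
            || PySem.Str.startswith lower "[executionoutcome]"
            || PySem.Str.startswith lower "[strategyswitch]" then filtered
        else filtered ++ [text]) acc = acc ++ l.filterMap pvKeep? := by
  induction l generalizing acc with
  | nil => simp
  | cons x xs ih =>
    simp only [List.foldl_cons, List.filterMap_cons]
    rw [bodyA_eq]
    cases h : pvKeep? x <;> simp only [ih] <;> simp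

theorem altCollect_cons (x : String) (rest out : List String) :
    altCollect (x :: rest) out
      = (match pvKeep? x with
         | none => altCollect rest out
         | some t =>
             let out' := out ++ [t]
             if out'.length = 18 then out' else altCollect rest out') := by
  simp only [altCollect, pvKeep?]
  split_ifs <;> simp_all

theorem altCollect_eq (l out : List String) (h : out.length < 18) :
    altCollect l out = out ++ (l.filterMap pvKeep?).take (18 - out.length) := by
  induction l generalizing out with
  | nil => simp [altCollect]
  | cons x xs ih =>
    rw [altCollect_cons, List.filterMap_cons]
    cases hk : pvKeep? x with
    | none => exact ih out h
    | some t =>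
      simp only []
      split_ifs with h3
      · have h18 : 18 - out.length = 1 := by simp at h3; omega
        simp [h18]
      · have hlen : (out ++ [t]).length < 18 := by simp at h3 ⊢; omega
        rw [ih _ hlen]
        have hs : 18 - out.length = (18 - (out ++ [t]).length) + 1 := by simp; omega
        simp [hs]

-- ===== VERDICT (by name: the statement is the Claim_ definition above) =====
theorem memory_action_history_py_spec : Claim_equal_memory_action_history_py := by
  intro state _
  unfold Spec_memory_action_history_py
  simp only [memory_action_history_py, memory_action_history_py_alt]
  rw [foldlA_eq_filterMap, altCollect_eq _ _ (by simp)]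
  simp only [List.nil_append, List.length_nil, Nat.sub_zero]
  rw [List.filterMap_reverse, List.take_reverse, List.reverse_reverse,
    PySem.List.slice_from_neg_ofNat _ 18 (by omega)]
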